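-- pv_equiv track=rewrite | github.com/monikase/Data-Analytics-Projects | _11-Chess Assignment/Chess_Final_Function.py | get_sliding_attacks
-- ===== SOURCE A (Python) =====
-- def get_sliding_attacks(position: str, directions: list[tuple[int, int]]) -> list[str]:
--     attack_squares = []
--     file = ord(position[0])
--     rank = int(position[1])
--
--     for d_file, d_rank in directions:
--         current_file = file + d_file
--         current_rank = rank + d_rank
--         while "a" <= chr(current_file) <= "h" and 1 <= current_rank <= 8:
--             attack_squares.append(f"{chr(current_file)}{current_rank}")
--             current_file += d_file
--             current_rank += d_rank
--     return attack_squares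
-- ===== SOURCE B (Python) =====
-- def get_sliding_attacks(position: str, directions: list[tuple[int, int]]) -> list[str]:
--     # Per direction: closed-form ray length via floor division, then emit k = 1..n.
--     attack_squares = []
--     file = ord(position[0])
--     rank = int(position[1])
--
--     for d_file, d_rank in directions:
--         # a ray contributes squares only if its first step lands on the board
--         if not ("a" <= chr(file + d_file) <= "h" and 1 <= rank + d_rank <= 8):
--             continue
--         limits = []
--         if d_file > 0:
--             limits.append((ord("h") - file) // d_file)
--         elif d_file < 0:
--             limits.append((file - ord("a")) // (-d_file))
--         if d_rank > 0:
--             limits.append((8 - rank) // d_rank)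
--         elif d_rank < 0:
--             limits.append((rank - 1) // (-d_rank))
--         n = min(limits, default=0)
--         for k in range(1, n + 1):
--             attack_squares.append(f"{chr(file + k * d_file)}{rank + k * d_rank}")
--     return attack_squares
-- ===== Notes on version B (the rewrite author's own statement) =====
-- stated objective: alternative
-- what changed: A walks each ray square by square, testing board membership at every step; B computes each ray's length in closed form as the minimum of per-axis floor-division distances to the board edge and then emits the k=1..n squares directly. Pre_ excludes inputs where A raises (short position, non-digit rank, chr out of range) or never returns (a (0,0) direction from an on-board square loops forever).
import Mathlib
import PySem

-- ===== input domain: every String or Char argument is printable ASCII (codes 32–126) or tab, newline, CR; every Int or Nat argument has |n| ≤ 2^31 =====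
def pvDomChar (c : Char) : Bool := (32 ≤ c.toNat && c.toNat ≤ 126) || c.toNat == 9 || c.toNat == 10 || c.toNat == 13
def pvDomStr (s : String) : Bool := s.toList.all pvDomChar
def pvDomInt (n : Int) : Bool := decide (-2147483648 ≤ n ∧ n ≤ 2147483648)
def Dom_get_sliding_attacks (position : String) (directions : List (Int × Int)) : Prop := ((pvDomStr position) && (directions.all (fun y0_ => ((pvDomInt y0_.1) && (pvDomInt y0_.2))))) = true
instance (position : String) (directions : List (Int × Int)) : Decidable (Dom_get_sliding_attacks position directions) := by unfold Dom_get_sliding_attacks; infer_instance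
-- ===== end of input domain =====

-- B replaces A's step-by-step while loop by a closed-form ray length (floor divisions)
-- per direction; equal return values on Pre_ (alternative decomposition, no speed claim).

-- ===== PORT A =====
-- shared head computation of both Pythons: file = ord(position[0]), rank = int(position[1])
def pvFile (position : String) : Int :=
  ((PySem.Str.pyGet? position 0).getD ' ').toNat    -- ord(position[0]); none (IndexError) outside Pre_
def pvRank (position : String) : Int :=
  (PySem.Int.ofStr? (String.ofList [(PySem.Str.pyGet? position 1).getD ' '])).getD 0  -- int(position[1]); ValueError outside Pre_
-- f"{chr(cf)}{cr}"
def pvSq (cf cr : Int) : String := String.ofList (Char.ofNat cf.toNat :: PySem.Int.toChars cr)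

-- A's while loop; the fuel only makes it total (under Pre_ the loop exits within 9 checks,
-- so fuel 16 is never exhausted).  The Python char test '"a" <= chr(cf) <= "h"' is ported as
-- the code-point comparison 97 ≤ cf ≤ 104, exact wherever chr does not raise (ensured by Pre_).
def pvLoopA : Nat → Int → Int → Int → Int → List String → List String
  | 0, _, _, _, _, acc => acc
  | Nat.succ fuel, cf, cr, df, dr, acc =>
    if 97 ≤ cf ∧ cf ≤ 104 ∧ 1 ≤ cr ∧ cr ≤ 8 then
      pvLoopA fuel (cf + df) (cr + dr) df dr (acc ++ [pvSq cf cr])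
    else acc

def get_sliding_attacks (position : String) (directions : List (Int × Int)) : List String :=
  let file := pvFile position
  let rank := pvRank position
  directions.foldl (fun acc d => pvLoopA 16 (file + d.1) (rank + d.2) d.1 d.2 acc) []

-- ===== PORT B =====
-- one direction's squares, by closed-form ray length (Source B's body of the for loop)
def pvSegB (file rank df dr : Int) : List String :=
  if 97 ≤ file + df ∧ file + df ≤ 104 ∧ 1 ≤ rank + dr ∧ rank + dr ≤ 8 then
    let limits : List Int :=
      (if df > 0 then [PySem.Int.floordiv (104 - file) df]
       else if df < 0 then [PySem.Int.floordiv (file - 97) (-df)] else []) ++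
      (if dr > 0 then [PySem.Int.floordiv (8 - rank) dr]
       else if dr < 0 then [PySem.Int.floordiv (rank - 1) (-dr)] else [])
    let n := (PySem.List.min? limits (fun x => x)).getD 0   -- min(limits, default=0)
    (PySem.List.pyRange 1 (n + 1) 1).map (fun k => pvSq (file + k * df) (rank + k * dr))
  else []

def get_sliding_attacks_alt (position : String) (directions : List (Int × Int)) : List String :=
  let file := pvFile position
  let rank := pvRank position
  directions.foldl (fun acc d => acc ++ pvSegB file rank d.1 d.2) []

-- ===== PRECONDITION & SPEC =====
-- on-board test for the k-th step of a ray
def pvOb (file rank df dr k : Int) : Bool :=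
  decide (97 ≤ file + k * df ∧ file + k * df ≤ 104 ∧ 1 ≤ rank + k * dr ∧ rank + k * dr ≤ 8)
-- chr(v) does not raise
def pvChrOk (v : Int) : Bool := decide (0 ≤ v ∧ v ≤ 1114111)
-- one direction is safe for A: chr never raises on any evaluated square (A checks steps
-- k = 1, 2, … and, when (df,dr) ≠ (0,0), at most 8 consecutive steps are on the board, so
-- only k ≤ 9 is ever reached), and the loop terminates (not both deltas 0 on an on-board square).
def pvDirOk (file rank df dr : Int) : Bool :=
  pvChrOk (file + df) &&
  (PySem.List.pyRange 2 10 1).all (fun k =>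
    !((PySem.List.pyRange 1 k 1).all (fun j => pvOb file rank df dr j)) || pvChrOk (file + k * df))

-- Pre_: exactly the inputs where Python A returns normally: position has ≥ 2 characters,
-- position[1] is a digit (else int() raises ValueError), no direction makes chr raise on an
-- evaluated square, and the while loop terminates (a (0,0) direction from an on-board
-- square would run forever).
def Pre_get_sliding_attacks (position : String) (directions : List (Int × Int)) : Prop :=
  match position.toList with
  | c0 :: c1 :: _ =>
    c1 ∈ "0123456789".toList ∧
    directions.all (fun d => pvDirOk (c0.toNat : Int) ((c1.toNat : Int) - 48) d.1 d.2) = true ∧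
    ¬((0, 0) ∈ directions ∧ c0 ∈ "abcdefgh".toList ∧ c1 ∈ "12345678".toList)
  | _ => False

instance (position : String) (directions : List (Int × Int)) : Decidable (Pre_get_sliding_attacks position directions) := by
  unfold Pre_get_sliding_attacks
  rcases position.toList with _ | ⟨c0, _ | ⟨c1, rest⟩⟩ <;> infer_instance

def pvWitness_get_sliding_attacks : String × (List (Int × Int)) :=
  ("d4", [(1, 1), (-1, 0), (0, -1), (2, 1)])

def Spec_get_sliding_attacks (position : String) (directions : List (Int × Int)) (out : List String) : Prop := out = get_sliding_attacks_alt position directions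
instance (position : String) (directions : List (Int × Int)) (out : List String) : Decidable (Spec_get_sliding_attacks position directions out) := by unfold Spec_get_sliding_attacks; infer_instance

-- ===== CLAIM (what is proved, stated in full; the proofs are below) =====
def Claim_equal_get_sliding_attacks : Prop := ∀ (position : String) (directions : List (Int × Int)), Dom_get_sliding_attacks position directions → Pre_get_sliding_attacks position directions → Spec_get_sliding_attacks position directions (get_sliding_attacks position directions)

-- ===== LEMMAS AND PROOFS =====

-- shifting the base square by one step shifts the step index
lemma pvOb_shift (file rank df dr k : Int) :
    pvOb (file + df) (rank + dr) df dr k = pvOb file rank df dr (k + 1) := by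
  unfold pvOb
  rw [show file + df + k * df = file + (k + 1) * df by ring,
      show rank + dr + k * dr = rank + (k + 1) * dr by ring]

-- A's loop appends exactly the m consecutive on-board squares (m = run length)
lemma pvLoopA_run (m : Nat) : ∀ (fuel : Nat) (file rank df dr : Int) (acc : List String),
    m < fuel →
    (∀ k : Nat, k < m → pvOb file rank df dr ((k : Int) + 1) = true) →
    pvOb file rank df dr ((m : Int) + 1) = false →
    pvLoopA fuel (file + df) (rank + dr) df dr acc =
      acc ++ (List.range m).map (fun (i : Nat) => pvSq (file + ((i : Int) + 1) * df) (rank + ((i : Int) + 1) * dr)) := by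
  induction m with
  | zero =>
    intro fuel file rank df dr acc hfuel _ hstop
    obtain ⟨fuel, rfl⟩ : ∃ f, fuel = f + 1 := ⟨fuel - 1, by omega⟩
    unfold pvLoopA
    rw [if_neg]
    · simp
    · intro hc
      have : pvOb file rank df dr ((0 : Int) + 1) = true := by
        unfold pvOb; rw [decide_eq_true_eq]
        constructor
        · rw [show file + (0 + 1) * df = file + df by ring]; exact hc.1
        refine ⟨?_, ?_, ?_⟩
        · rw [show file + (0 + 1) * df = file + df by ring]; exact hc.2.1
        · rw [show rank + (0 + 1) * dr = rank + dr by ring]; exact hc.2.2.1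
        · rw [show rank + (0 + 1) * dr = rank + dr by ring]; exact hc.2.2.2
      simp only [Nat.cast_zero] at hstop
      rw [this] at hstop; simp at hstop
  | succ m ih =>
    intro fuel file rank df dr acc hfuel hrun hstop
    obtain ⟨fuel, rfl⟩ : ∃ f, fuel = f + 1 := ⟨fuel - 1, by omega⟩
    have h1 : pvOb file rank df dr 1 = true := by
      have := hrun 0 (by omega); simpa using this
    have hc : 97 ≤ file + df ∧ file + df ≤ 104 ∧ 1 ≤ rank + dr ∧ rank + dr ≤ 8 := by
      unfold pvOb at h1; rw [decide_eq_true_eq] at h1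
      rw [show file + 1 * df = file + df by ring, show rank + 1 * dr = rank + dr by ring] at h1
      exact h1
    unfold pvLoopA
    rw [if_pos hc]
    have step : ∀ (acc' : List String),
        pvLoopA fuel ((file + df) + df) ((rank + dr) + dr) df dr acc' =
          acc' ++ (List.range m).map (fun (i : Nat) => pvSq ((file + df) + ((i : Int) + 1) * df) ((rank + dr) + ((i : Int) + 1) * dr)) := by
      intro acc'
      apply ih fuel (file + df) (rank + dr) df dr acc' (by omega)
      · intro k hk
        rw [pvOb_shift]
        have := hrun (k + 1) (by omega)
        rw [show ((k : Int) + 1 + 1) = (((k + 1 : Nat) : Int) + 1) by push_cast; ring]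
        exact this
      · rw [pvOb_shift]
        rw [show ((m : Int) + 1 + 1) = (((m + 1 : Nat) : Int) + 1) by push_cast; ring]
        exact hstop
    rw [step, List.range_succ_eq_map, List.map_cons, List.map_map, List.append_assoc,
        List.singleton_append]
    congr 1
    congr 1
    · simp
    · apply List.map_congr_left
      intro i _
      simp only [Function.comp_apply]
      congr 1 <;> push_cast <;> ring

-- axis lemma, positive delta: L = (hi - p) // d is the last in-range step
lemma pvAxis_pos (lo hi p d : Int) (hw : hi - lo = 7) (hd : 0 < d)
    (h1 : lo ≤ p + d) (h2 : p + d ≤ hi) :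
    1 ≤ PySem.Int.floordiv (hi - p) d ∧ PySem.Int.floordiv (hi - p) d ≤ 8 ∧
    (∀ k : Int, 1 ≤ k → k ≤ PySem.Int.floordiv (hi - p) d → lo ≤ p + k * d ∧ p + k * d ≤ hi) ∧
    hi < p + (PySem.Int.floordiv (hi - p) d + 1) * d := by
  set L := PySem.Int.floordiv (hi - p) d with hL
  have hbr : L * d ≤ hi - p ∧ hi - p < (L + 1) * d :=
    (PySem.Int.floordiv_eq_iff_of_pos hd).mp hL.symm
  refine ⟨?_, ?_, ?_, by linarith [hbr.2]⟩
  · rw [hL, PySem.Int.le_floordiv_iff_mul_le hd]; nlinarith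
  · have : L < 9 := by
      rw [hL, PySem.Int.floordiv_lt_iff_lt_mul hd]; nlinarith
    omega
  · intro k hk1 hkL
    constructor
    · nlinarith
    · nlinarith [hbr.1, mul_le_mul_of_nonneg_right hkL hd.le]

-- axis lemma, negative delta: L = (p - lo) // (-d) is the last in-range step
lemma pvAxis_neg (lo hi p d : Int) (hw : hi - lo = 7) (hd : d < 0)
    (h1 : lo ≤ p + d) (h2 : p + d ≤ hi) :
    1 ≤ PySem.Int.floordiv (p - lo) (-d) ∧ PySem.Int.floordiv (p - lo) (-d) ≤ 8 ∧
    (∀ k : Int, 1 ≤ k → k ≤ PySem.Int.floordiv (p - lo) (-d) → lo ≤ p + k * d ∧ p + k * d ≤ hi) ∧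
    p + (PySem.Int.floordiv (p - lo) (-d) + 1) * d < lo := by
  have hd' : 0 < -d := by omega
  set L := PySem.Int.floordiv (p - lo) (-d) with hL
  have hbr : L * (-d) ≤ p - lo ∧ p - lo < (L + 1) * (-d) :=
    (PySem.Int.floordiv_eq_iff_of_pos hd').mp hL.symm
  refine ⟨?_, ?_, ?_, by nlinarith [hbr.2]⟩
  · rw [hL, PySem.Int.le_floordiv_iff_mul_le hd']; nlinarith
  · have : L < 9 := by
      rw [hL, PySem.Int.floordiv_lt_iff_lt_mul hd']; nlinarith
    omega
  · intro k hk1 hkL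
    constructor
    · nlinarith [hbr.1, mul_le_mul_of_nonneg_right hkL hd'.le]
    · nlinarith

-- the B-side map over pyRange is the same map over List.range
lemma pvSegB_range (file rank df dr n : Int) (hn : 0 ≤ n) :
    (PySem.List.pyRange 1 (n + 1) 1).map (fun k => pvSq (file + k * df) (rank + k * dr)) =
      (List.range n.toNat).map (fun (i : Nat) => pvSq (file + ((i : Int) + 1) * df) (rank + ((i : Int) + 1) * dr)) := by
  rw [PySem.List.pyRange_one, List.map_map]
  rw [show (n + 1 - 1).toNat = n.toNat by omega]
  apply List.map_congr_left
  intro i _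
  simp only [Function.comp_apply]
  rw [show (1 : Int) + (i : Int) = (i : Int) + 1 by ring]

-- pvOb at step 1 is the loop guard at the first square
lemma pvOb_one (file rank df dr : Int) :
    pvOb file rank df dr 1 =
      decide (97 ≤ file + df ∧ file + df ≤ 104 ∧ 1 ≤ rank + dr ∧ rank + dr ≤ 8) := by
  unfold pvOb
  rw [show file + 1 * df = file + df by ring, show rank + 1 * dr = rank + dr by ring]

-- the common core: if n ≥ 1 bounds the consecutive on-board run exactly, the loop emits k = 1..n
lemma pvCore (file rank df dr n : Int) (acc : List String)
    (hn1 : 1 ≤ n) (hn8 : n ≤ 8)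
    (hin : ∀ k : Int, 1 ≤ k → k ≤ n →
      97 ≤ file + k * df ∧ file + k * df ≤ 104 ∧ 1 ≤ rank + k * dr ∧ rank + k * dr ≤ 8)
    (hstop : ¬(97 ≤ file + (n + 1) * df ∧ file + (n + 1) * df ≤ 104 ∧
               1 ≤ rank + (n + 1) * dr ∧ rank + (n + 1) * dr ≤ 8)) :
    pvLoopA 16 (file + df) (rank + dr) df dr acc =
      acc ++ (PySem.List.pyRange 1 (n + 1) 1).map (fun k => pvSq (file + k * df) (rank + k * dr)) := by
  rw [pvSegB_range file rank df dr n (by omega)]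
  apply pvLoopA_run n.toNat 16 file rank df dr acc (by omega)
  · intro k hk
    unfold pvOb; rw [decide_eq_true_eq]
    exact hin ((k : Int) + 1) (by omega) (by omega)
  · unfold pvOb; rw [decide_eq_false_iff_not]
    rw [show ((n.toNat : Int) + 1) = n + 1 by omega]
    exact hstop

-- the per-direction equality: A's while loop = B's closed-form segment
lemma pvDir_eq (file rank df dr : Int)
    (h0 : ¬(df = 0 ∧ dr = 0 ∧ pvOb file rank df dr 1 = true)) (acc : List String) :
    pvLoopA 16 (file + df) (rank + dr) df dr acc = acc ++ pvSegB file rank df dr := by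
  simp only [pvSegB]
  by_cases hg : 97 ≤ file + df ∧ file + df ≤ 104 ∧ 1 ≤ rank + dr ∧ rank + dr ≤ 8
  · rw [if_pos hg]
    rcases lt_trichotomy df 0 with hdf | hdf | hdf <;> rcases lt_trichotomy dr 0 with hdr | hdr | hdr
    -- df neg, dr neg
    · have A1 := pvAxis_neg 97 104 file df (by norm_num) hdf hg.1 hg.2.1
      have A2 := pvAxis_neg 1 8 rank dr (by norm_num) hdr hg.2.2.1 hg.2.2.2
      rw [if_neg (show ¬ (df > 0) by omega), if_pos hdf, if_neg (show ¬ (dr > 0) by omega), if_pos hdr]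
      simp only [List.cons_append, List.nil_append,
        PySem.List.min?_id_cons, Option.getD_some, List.foldl_cons, List.foldl_nil]
      apply pvCore _ _ _ _ _ _ (by omega) (by omega)
      · intro k hk1 hk2
        exact ⟨(A1.2.2.1 k hk1 (by omega)).1, (A1.2.2.1 k hk1 (by omega)).2,
               (A2.2.2.1 k hk1 (by omega)).1, (A2.2.2.1 k hk1 (by omega)).2⟩
      · rcases min_cases (PySem.Int.floordiv (file - 97) (-df)) (PySem.Int.floordiv (rank - 1) (-dr)) with
          ⟨hm, _⟩ | ⟨hm, _⟩ <;> rw [hm] <;> intro hcon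
        · exact absurd hcon.1 (by have := A1.2.2.2; omega)
        · exact absurd hcon.2.2.1 (by have := A2.2.2.2; omega)
    -- df neg, dr zero
    · subst hdr
      have A1 := pvAxis_neg 97 104 file df (by norm_num) hdf hg.1 hg.2.1
      rw [if_neg (show ¬ (df > 0) by omega), if_pos hdf, if_neg (show ¬ ((0:Int) > 0) by norm_num), if_neg (show ¬ ((0:Int) < 0) by norm_num)]
      simp only [List.append_nil,
        PySem.List.min?_id_cons, Option.getD_some, List.foldl_nil]
      apply pvCore _ _ _ _ _ _ (by omega) (by omega)
      · intro k hk1 hk2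
        refine ⟨(A1.2.2.1 k hk1 (by omega)).1, (A1.2.2.1 k hk1 (by omega)).2, ?_, ?_⟩ <;>
          · rw [mul_zero]; omega
      · intro hcon
        exact absurd hcon.1 (by have := A1.2.2.2; omega)
    -- df neg, dr pos
    · have A1 := pvAxis_neg 97 104 file df (by norm_num) hdf hg.1 hg.2.1
      have A2 := pvAxis_pos 1 8 rank dr (by norm_num) hdr hg.2.2.1 hg.2.2.2
      rw [if_neg (show ¬ (df > 0) by omega), if_pos hdf, if_pos hdr]
      simp only [List.cons_append, List.nil_append,
        PySem.List.min?_id_cons, Option.getD_some, List.foldl_cons, List.foldl_nil]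
      apply pvCore _ _ _ _ _ _ (by omega) (by omega)
      · intro k hk1 hk2
        exact ⟨(A1.2.2.1 k hk1 (by omega)).1, (A1.2.2.1 k hk1 (by omega)).2,
               (A2.2.2.1 k hk1 (by omega)).1, (A2.2.2.1 k hk1 (by omega)).2⟩
      · rcases min_cases (PySem.Int.floordiv (file - 97) (-df)) (PySem.Int.floordiv (8 - rank) dr) with
          ⟨hm, _⟩ | ⟨hm, _⟩ <;> rw [hm] <;> intro hcon
        · exact absurd hcon.1 (by have := A1.2.2.2; omega)
        · exact absurd hcon.2.2.2 (by have := A2.2.2.2; omega)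
    -- df zero, dr neg
    · subst hdf
      have A2 := pvAxis_neg 1 8 rank dr (by norm_num) hdr hg.2.2.1 hg.2.2.2
      rw [if_neg (show ¬ ((0:Int) > 0) by norm_num), if_neg (show ¬ ((0:Int) < 0) by norm_num), if_neg (show ¬ (dr > 0) by omega), if_pos hdr]
      simp only [List.nil_append,
        PySem.List.min?_id_cons, Option.getD_some, List.foldl_nil]
      apply pvCore _ _ _ _ _ _ (by omega) (by omega)
      · intro k hk1 hk2
        refine ⟨?_, ?_, (A2.2.2.1 k hk1 (by omega)).1, (A2.2.2.1 k hk1 (by omega)).2⟩ <;>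
          · rw [mul_zero]; omega
      · intro hcon
        exact absurd hcon.2.2.1 (by have := A2.2.2.2; omega)
    -- df = 0, dr = 0 : excluded by h0
    · exfalso
      apply h0
      refine ⟨hdf, hdr, ?_⟩
      rw [pvOb_one, decide_eq_true_eq]
      exact hg
    -- df zero, dr pos
    · subst hdf
      have A2 := pvAxis_pos 1 8 rank dr (by norm_num) hdr hg.2.2.1 hg.2.2.2
      rw [if_neg (show ¬ ((0:Int) > 0) by norm_num), if_neg (show ¬ ((0:Int) < 0) by norm_num), if_pos hdr]
      simp only [List.nil_append,
        PySem.List.min?_id_cons, Option.getD_some, List.foldl_nil]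
      apply pvCore _ _ _ _ _ _ (by omega) (by omega)
      · intro k hk1 hk2
        refine ⟨?_, ?_, (A2.2.2.1 k hk1 (by omega)).1, (A2.2.2.1 k hk1 (by omega)).2⟩ <;>
          · rw [mul_zero]; omega
      · intro hcon
        exact absurd hcon.2.2.2 (by have := A2.2.2.2; omega)
    -- df pos, dr neg
    · have A1 := pvAxis_pos 97 104 file df (by norm_num) hdf hg.1 hg.2.1
      have A2 := pvAxis_neg 1 8 rank dr (by norm_num) hdr hg.2.2.1 hg.2.2.2
      rw [if_pos hdf, if_neg (show ¬ (dr > 0) by omega), if_pos hdr]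
      simp only [List.cons_append, List.nil_append,
        PySem.List.min?_id_cons, Option.getD_some, List.foldl_cons, List.foldl_nil]
      apply pvCore _ _ _ _ _ _ (by omega) (by omega)
      · intro k hk1 hk2
        exact ⟨(A1.2.2.1 k hk1 (by omega)).1, (A1.2.2.1 k hk1 (by omega)).2,
               (A2.2.2.1 k hk1 (by omega)).1, (A2.2.2.1 k hk1 (by omega)).2⟩
      · rcases min_cases (PySem.Int.floordiv (104 - file) df) (PySem.Int.floordiv (rank - 1) (-dr)) with
          ⟨hm, _⟩ | ⟨hm, _⟩ <;> rw [hm] <;> intro hcon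
        · exact absurd hcon.2.1 (by have := A1.2.2.2; omega)
        · exact absurd hcon.2.2.1 (by have := A2.2.2.2; omega)
    -- df pos, dr zero
    · subst hdr
      have A1 := pvAxis_pos 97 104 file df (by norm_num) hdf hg.1 hg.2.1
      rw [if_pos hdf, if_neg (show ¬ ((0:Int) > 0) by norm_num), if_neg (show ¬ ((0:Int) < 0) by norm_num)]
      simp only [List.append_nil,
        PySem.List.min?_id_cons, Option.getD_some, List.foldl_nil]
      apply pvCore _ _ _ _ _ _ (by omega) (by omega)
      · intro k hk1 hk2
        refine ⟨(A1.2.2.1 k hk1 (by omega)).1, (A1.2.2.1 k hk1 (by omega)).2, ?_, ?_⟩ <;>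
          · rw [mul_zero]; omega
      · intro hcon
        exact absurd hcon.2.1 (by have := A1.2.2.2; omega)
    -- df pos, dr pos
    · have A1 := pvAxis_pos 97 104 file df (by norm_num) hdf hg.1 hg.2.1
      have A2 := pvAxis_pos 1 8 rank dr (by norm_num) hdr hg.2.2.1 hg.2.2.2
      rw [if_pos hdf, if_pos hdr]
      simp only [List.cons_append, List.nil_append,
        PySem.List.min?_id_cons, Option.getD_some, List.foldl_cons, List.foldl_nil]
      apply pvCore _ _ _ _ _ _ (by omega) (by omega)
      · intro k hk1 hk2
        exact ⟨(A1.2.2.1 k hk1 (by omega)).1, (A1.2.2.1 k hk1 (by omega)).2,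
               (A2.2.2.1 k hk1 (by omega)).1, (A2.2.2.1 k hk1 (by omega)).2⟩
      · rcases min_cases (PySem.Int.floordiv (104 - file) df) (PySem.Int.floordiv (8 - rank) dr) with
          ⟨hm, _⟩ | ⟨hm, _⟩ <;> rw [hm] <;> intro hcon
        · exact absurd hcon.2.1 (by have := A1.2.2.2; omega)
        · exact absurd hcon.2.2.2 (by have := A2.2.2.2; omega)
  · rw [if_neg hg, List.append_nil]
    have h := pvLoopA_run 0 16 file rank df dr acc (by omega) (by intro k hk; omega) ?_
    · simpa using h
    · rw [show (((0 : Nat) : Int) + 1) = 1 by norm_num, pvOb_one, decide_eq_false_iff_not]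
      exact hg

-- fold the per-direction equality over the list of directions
lemma pvFold_eq (file rank : Int) (dirs : List (Int × Int))
    (h : ∀ d ∈ dirs, ¬(d.1 = 0 ∧ d.2 = 0 ∧ pvOb file rank d.1 d.2 1 = true)) :
    ∀ acc : List String,
      dirs.foldl (fun acc d => pvLoopA 16 (file + d.1) (rank + d.2) d.1 d.2 acc) acc =
        dirs.foldl (fun acc d => acc ++ pvSegB file rank d.1 d.2) acc := by
  induction dirs with
  | nil => intro acc; rfl
  | cons d t ih =>
    intro acc
    simp only [List.foldl_cons]
    rw [pvDir_eq file rank d.1 d.2 (h d (by simp)) acc]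
    exact ih (fun e he => h e (by simp [he])) _

-- int(position[1]) of a digit character
lemma pvDigit_ofStr (c : Char) (h : c ∈ "0123456789".toList) :
    PySem.Int.ofStr? (String.ofList [c]) = some ((c.toNat : Int) - 48) := by
  have h' : c ∈ ['0', '1', '2', '3', '4', '5', '6', '7', '8', '9'] := by simpa using h
  fin_cases h' <;> decide

-- a character with code 97..104 is one of the files a..h
lemma pvFileMem (c : Char) (h1 : 97 ≤ c.toNat) (h2 : c.toNat ≤ 104) : c ∈ "abcdefgh".toList := by
  have hc := Char.ofNat_toNat c
  interval_cases hn : c.toNat <;> (rw [← hc]; decide)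

-- a character with code 49..56 is one of the ranks 1..8
lemma pvRankMem (c : Char) (h1 : 49 ≤ c.toNat) (h2 : c.toNat ≤ 56) : c ∈ "12345678".toList := by
  have hc := Char.ofNat_toNat c
  interval_cases hn : c.toNat <;> (rw [← hc]; decide)

-- ===== VERDICT (by name: the statement is the Claim_ definition above) =====
theorem get_sliding_attacks_spec : Claim_equal_get_sliding_attacks := by
  intro position directions _ hpre
  unfold Pre_get_sliding_attacks at hpre
  unfold Spec_get_sliding_attacks get_sliding_attacks get_sliding_attacks_alt
  rcases hlist : position.toList with _ | ⟨c0, _ | ⟨c1, rest⟩⟩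
  · rw [hlist] at hpre; exact absurd hpre (by simp)
  · rw [hlist] at hpre; exact absurd hpre (by simp)
  rw [hlist] at hpre
  obtain ⟨hd, hall, hterm⟩ := hpre
  have h0 : PySem.Str.pyGet? position 0 = some c0 := by
    rw [show (0 : Int) = ((0 : Nat) : Int) by norm_num, PySem.Str.pyGet?_natCast, hlist]; rfl
  have h1 : PySem.Str.pyGet? position 1 = some c1 := by
    rw [show (1 : Int) = ((1 : Nat) : Int) by norm_num, PySem.Str.pyGet?_natCast, hlist]; rfl
  have hf : pvFile position = (c0.toNat : Int) := by
    unfold pvFile; rw [h0]; rfl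
  have hr : pvRank position = (c1.toNat : Int) - 48 := by
    unfold pvRank; rw [h1]
    simp only [Option.getD_some]
    rw [pvDigit_ofStr c1 hd]; rfl
  simp only [hf, hr]
  apply pvFold_eq
  intro d hdmem hcon
  obtain ⟨hz1, hz2, hz3⟩ := hcon
  apply hterm
  refine ⟨?_, ?_, ?_⟩
  · have : d = ((0 : Int), (0 : Int)) := by
      cases d; simp only [Prod.mk.injEq]; exact ⟨hz1, hz2⟩
    rwa [this] at hdmem
  · unfold pvOb at hz3
    rw [hz1, hz2, decide_eq_true_eq] at hz3
    simp only [mul_zero, add_zero] at hz3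
    exact pvFileMem c0 (by omega) (by omega)
  · unfold pvOb at hz3
    rw [hz1, hz2, decide_eq_true_eq] at hz3
    simp only [mul_zero, add_zero] at hz3
    exact pvRankMem c1 (by omega) (by omega)
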